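-- pv_equiv track=rewrite | github.com/VisualDudek/aoc-python | python_exercises_tests.py | solution_combined_1
-- ===== SOURCE A (Python) =====
-- from collections import Counter, defaultdict
-- from typing import Callable, List, Tuple, Dict, Any
--
-- def solution_combined_1(words: List[str], frequencies: Dict[str, int]) -> Dict[str, int]:
--     """Solution combining Counter and dict.get()"""
--     scores = {}
--     for word in words:
--         letter_counts = Counter(word)
--         score = sum(
--             count * frequencies.get(letter, 0)
--             for letter, count in letter_counts.items()
--         )
--         scores[word] = score
--     return scores
-- ===== SOURCE B (Python) =====
-- from typing import List, Dict
--
--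
-- def solution_combined_1(words: List[str], frequencies: Dict[str, int]) -> Dict[str, int]:
--     """Invert the loops: per word, iterate the frequency table and count each
--     letter's occurrences in the word with str.count (only single-character
--     keys can ever match a letter)."""
--     return {
--         word: sum(
--             freq * word.count(letter)
--             for letter, freq in frequencies.items()
--             if len(letter) == 1
--         )
--         for word in words
--     }
-- ===== Notes on version B (the rewrite author's own statement) =====
-- stated objective: alternative
-- what changed: Inverts the loop structure: instead of building a per-word Counter and summing count*frequency over its items, B iterates the frequency table per word and accumulates freq * word.count(letter) for each single-character key, so the per-letter count table disappears.
import Mathlib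
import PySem

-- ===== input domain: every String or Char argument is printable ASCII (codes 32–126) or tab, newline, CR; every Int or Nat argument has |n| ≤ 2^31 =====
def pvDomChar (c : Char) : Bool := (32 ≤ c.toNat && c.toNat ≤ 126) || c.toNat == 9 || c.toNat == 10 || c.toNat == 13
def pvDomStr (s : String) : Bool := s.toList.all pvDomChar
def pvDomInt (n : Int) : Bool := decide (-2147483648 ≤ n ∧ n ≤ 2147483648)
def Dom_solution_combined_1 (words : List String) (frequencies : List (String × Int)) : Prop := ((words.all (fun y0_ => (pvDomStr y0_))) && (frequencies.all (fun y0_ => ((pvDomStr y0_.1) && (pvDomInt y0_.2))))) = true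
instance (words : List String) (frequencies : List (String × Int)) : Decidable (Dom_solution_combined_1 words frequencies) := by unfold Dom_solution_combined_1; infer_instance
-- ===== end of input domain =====

-- B inverts the loops: instead of A's per-word Counter summed against frequency lookups, B iterates
-- the frequency table and counts each single-character key's occurrences in the word with
-- str.count (objective: alternative); same return value on all inputs.

-- ===== PORT A =====
def solution_combined_1 (words : List String) (frequencies : List (String × Int)) : List (String × Int) :=
  (words.foldl (fun (scores : PySem.Dict String Int) word =>
      let letterCounts := PySem.Dict.counter word.toList
      let score := (letterCounts.items.map (fun p =>
          p.2 * (PySem.Dict.ofList frequencies).getD (String.ofList [p.1]) 0)).sum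
      scores.insert word score)
    PySem.Dict.empty).items

-- ===== PORT B =====
def solution_combined_1_alt (words : List String) (frequencies : List (String × Int)) : List (String × Int) :=
  (words.foldl (fun (scores : PySem.Dict String Int) word =>
      scores.insert word
        ((PySem.Dict.ofList frequencies).items.foldl (fun s p =>
            if PySem.Str.len p.1 = 1 then s + p.2 * (PySem.Str.count word p.1 : Int) else s) 0))
    PySem.Dict.empty).items

-- ===== PRECONDITION & SPEC =====
def Spec_solution_combined_1 (words : List String) (frequencies : List (String × Int)) (out : List (String × Int)) : Prop := out = solution_combined_1_alt words frequencies
instance (words : List String) (frequencies : List (String × Int)) (out : List (String × Int)) : Decidable (Spec_solution_combined_1 words frequencies out) := by unfold Spec_solution_combined_1; infer_instance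

-- ===== CLAIM (what is proved, stated in full; the proofs are below) =====
def Claim_equal_solution_combined_1 : Prop := ∀ (words : List String) (frequencies : List (String × Int)), Dom_solution_combined_1 words frequencies → Spec_solution_combined_1 words frequencies (solution_combined_1 words frequencies)

-- ===== LEMMAS AND PROOFS =====

-- a string equals the one-character string of c iff its character list is [c]
theorem eq_ofList_singleton_iff (k : String) (c : Char) :
    k = String.ofList [c] ↔ k.toList = [c] := by
  rw [eq_comm, String.ofList_eq]
  exact eq_comm

-- Python's s.count(sub) for a one-character needle is the plain character count
theorem count_go_singleton (c : Char) :
    ∀ (cs : List Char) (fuel acc : Nat), cs.length ≤ fuel →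
      PySem.Chars.count.go [c] fuel cs acc = acc + cs.count c
  | [], fuel, acc, _ => by cases fuel <;> simp [PySem.Chars.count.go]
  | h :: t, fuel + 1, acc, hle => by
    rw [PySem.Chars.count.go]
    by_cases hc : c = h
    · subst hc
      simp only [List.isPrefixOf, BEq.rfl, Bool.and_self, if_true]
      simp only [List.length_cons, List.length_nil, List.drop_succ_cons, List.drop_zero]
      rw [count_go_singleton c t fuel (acc + 1) (by simpa using hle)]
      simp
      omega
    · have hpre : ([c].isPrefixOf (h :: t)) = false := by
        simp [List.isPrefixOf, beq_eq_false_iff_ne.mpr hc]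
      rw [hpre]
      simp only [Bool.false_eq_true, if_false]
      rw [count_go_singleton c t fuel acc (by simpa using hle)]
      have : ¬ (h = c) := fun h' => hc h'.symm
      simp [this]

theorem chars_count_singleton (cs : List Char) (c : Char) :
    PySem.Chars.count cs [c] = cs.count c := by
  simpa [PySem.Chars.count] using count_go_singleton c cs cs.length 0 le_rfl

-- a sum of 'v if c = c0 else 0' over the characters is v times the character count
theorem sum_map_ite_eq_count (cs : List Char) (c0 : Char) (v : Int) :
    (cs.map (fun c => if c = c0 then v else 0)).sum = v * (cs.count c0 : Int) := by
  induction cs with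
  | nil => simp
  | cons h t ih =>
    by_cases hc : h = c0
    · simp [hc, ih]; ring
    · simp [hc, ih]

-- grouping by letter and multiplying by the count gives the plain per-character sum
theorem grouped_sum (xs : List Char) (g : Char → Int) :
    ((PySem.Set.ofList xs).map (fun k => (xs.count k : Int) * g k)).sum = (xs.map g).sum := by
  rw [← List.sum_toFinset _ (PySem.Set.nodup_ofList xs), Finset.sum_list_map_count]
  apply Finset.sum_congr
  · ext a; simp [PySem.Set.mem_ofList]
  · intro a _; simp

-- first-match lookup of every character of the word, summed, equals the sum over the
-- distinct-key association list of value × character count (only one-character keys match)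
theorem lookup_sum (word : String) :
    ∀ (l : List (String × Int)), (l.map Prod.fst).Nodup →
      (word.toList.map (fun c => (PySem.Dict.mk l).getD (String.ofList [c]) 0)).sum
        = ((l.filter (fun p => decide (PySem.Str.len p.1 = 1))).map
            (fun p => p.2 * (PySem.Str.count word p.1 : Int))).sum
  | [], _ => by simp [PySem.Dict.getD_eq_get?_getD, PySem.Dict.get?]
  | (k, v) :: rest, hnd => by
    have hnd' : (rest.map Prod.fst).Nodup := (List.nodup_cons.mp hnd).2
    have hk : k ∉ rest.map Prod.fst := (List.nodup_cons.mp hnd).1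
    have hrest0 : (PySem.Dict.mk rest).get? k = none := by
      rw [PySem.Dict.get?_eq_none_iff_not_mem_keys]
      simpa [PySem.Dict.keys_mk] using hk
    -- split each term into the head entry's contribution plus the tail lookup
    have hsplit : ∀ c : Char,
        (PySem.Dict.mk ((k, v) :: rest)).getD (String.ofList [c]) 0
          = (if k = String.ofList [c] then v else 0)
            + (PySem.Dict.mk rest).getD (String.ofList [c]) 0 := by
      intro c
      rw [PySem.Dict.getD_eq_get?_getD, PySem.Dict.get?_mk_cons]
      by_cases h : k = String.ofList [c]
      · rw [if_pos h]
        simp only [h, BEq.rfl, if_pos]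
        rw [PySem.Dict.getD_eq_get?_getD, ← h, hrest0]
        simp
      · have hb : (k == String.ofList [c]) = false := by simpa using h
        rw [hb]
        simp only [Bool.false_eq_true, if_false, if_neg h, zero_add]
        rw [PySem.Dict.getD_eq_get?_getD]
    calc (word.toList.map (fun c => (PySem.Dict.mk ((k, v) :: rest)).getD (String.ofList [c]) 0)).sum
        = (word.toList.map (fun c =>
            (if k = String.ofList [c] then v else 0)
              + (PySem.Dict.mk rest).getD (String.ofList [c]) 0)).sum :=
          congrArg List.sum (List.map_congr_left (fun c _ => hsplit c))
      _ = (word.toList.map (fun c => if k = String.ofList [c] then v else 0)).sum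
            + (word.toList.map (fun c => (PySem.Dict.mk rest).getD (String.ofList [c]) 0)).sum :=
          PySem.List.sum_map_add_int _ _ _
      _ = ((((k, v) :: rest).filter (fun p => decide (PySem.Str.len p.1 = 1))).map
            (fun p => p.2 * (PySem.Str.count word p.1 : Int))).sum := by
          rw [lookup_sum word rest hnd']
          by_cases hlen : k.toList.length = 1
          · obtain ⟨c0, hc0⟩ := List.length_eq_one_iff.mp hlen
            have h1 : ∀ c : Char, (k = String.ofList [c]) ↔ c = c0 := by
              intro c
              rw [eq_ofList_singleton_iff, hc0]
              constructor
              · intro h; injection h with h1 _; exact h1.symm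
              · intro h; rw [h]
            have hkeep : (decide (PySem.Str.len k = 1)) = true := by
              simp [PySem.Str.len, hlen]
            have hlf : k.length = 1 := by
              rw [String.length_toList] at hlen; exact hlen
            have hcnt : (PySem.Str.count word k : Int) = (word.toList.count c0 : Int) := by
              rw [PySem.Str.count_eq, hc0, chars_count_singleton]
            simp only [List.filter_cons, hkeep, if_pos, List.map_cons, List.sum_cons]
            simp only [h1, sum_map_ite_eq_count, hcnt]
          · have h1 : ∀ c : Char, ¬ (k = String.ofList [c]) := by
              intro c h
              exact hlen (by rw [(eq_ofList_singleton_iff k c).mp h]; rfl)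
            have hlf : ¬ (k.length = 1) := by
              rw [String.length_toList] at hlen; exact hlen
            simp [h1, hlf]

-- the two per-word scores coincide
theorem score_eq (frequencies : List (String × Int)) (word : String) :
    ((PySem.Dict.counter word.toList).items.map (fun p =>
        p.2 * (PySem.Dict.ofList frequencies).getD (String.ofList [p.1]) 0)).sum
      = (PySem.Dict.ofList frequencies).items.foldl (fun s p =>
          if PySem.Str.len p.1 = 1 then s + p.2 * (PySem.Str.count word p.1 : Int) else s) 0 := by
  have hnd : ((PySem.Dict.ofList frequencies).items.map Prod.fst).Nodup := by
    have h := PySem.Dict.nodup_keys_ofList (ps := frequencies)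
    simpa [PySem.Dict.keys] using h
  have hmk : PySem.Dict.mk (PySem.Dict.ofList frequencies).items = PySem.Dict.ofList frequencies := by
    apply PySem.Dict.ext; rfl
  rw [PySem.List.foldl_ite_eq_foldl_filter (p := fun p : String × Int => PySem.Str.len p.1 = 1)
    (f := fun s p => s + p.2 * (PySem.Str.count word p.1 : Int)), PySem.List.foldl_add, zero_add,
    ← lookup_sum word (PySem.Dict.ofList frequencies).items hnd, hmk,
    PySem.Dict.items_counter, List.map_map]
  simpa using grouped_sum word.toList
    (fun c => (PySem.Dict.ofList frequencies).getD (String.ofList [c]) 0)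

-- ===== VERDICT (by name: the statement is the Claim_ definition above) =====
theorem solution_combined_1_spec : Claim_equal_solution_combined_1 := by
  intro words frequencies _
  unfold Spec_solution_combined_1 solution_combined_1 solution_combined_1_alt
  simp only [score_eq]
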